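-- pv_equiv track=rewrite | github.com/happymix555/Module6-7 | path_finder.py | short_path_with_height
-- ===== SOURCE A (Python) =====
-- def short_path_with_height(shortest_path, full_path_with_height):
--     short_path_with_height = []
--     for sp in shortest_path:
--         for fph in full_path_with_height:
--             if sp[0] == fph[0] and sp[1] == fph[1]:
--                 short_path_with_height.append([sp[0], sp[1], fph[2]])
--     real_path = []
--     stack = []
--     ref = None
--     for sp in short_path_with_height:
--         if sp[2] == None:
--             if ref != None:
--                 sp[2] = ref
--                 real_path.append(sp)
--             else:
--                 stack.append(sp)
--         else:
--             if stack == []: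
--                 real_path.append(sp)
--                 ref = sp[2]
--             else:
--                 ref = sp[2]
--                 for p in stack:
--                     p[2] = ref
--                     real_path.append(p)
--                 real_path.append(sp)
--                 stack = []
--     return real_path
-- ===== SOURCE B (Python) =====
-- def short_path_with_height(shortest_path, full_path_with_height):
--     joined = [(sp[0], sp[1], fph[2])
--               for sp in shortest_path
--               for fph in full_path_with_height
--               if sp[0] == fph[0] and sp[1] == fph[1]]
--     ref = next((h for (_, _, h) in joined if h is not None), None)
--     if ref is None:
--         return []
--     result = []
--     for x, y, h in joined:
--         if h is None:
--             result.append([x, y, ref])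
--         else:
--             ref = h
--             result.append([x, y, h])
--     return result
-- ===== Notes on version B (the rewrite author's own statement) =====
-- stated objective: simpler
-- what changed: Phase 2's stack-and-flush machine (buffer leading null-height rows, back-fill them when the first value arrives, forward-fill afterwards) is replaced by a scan for the first non-null height (return [] if none) followed by a single forward pass carrying a running reference; the join becomes a comprehension of tuples.
import Mathlib
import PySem

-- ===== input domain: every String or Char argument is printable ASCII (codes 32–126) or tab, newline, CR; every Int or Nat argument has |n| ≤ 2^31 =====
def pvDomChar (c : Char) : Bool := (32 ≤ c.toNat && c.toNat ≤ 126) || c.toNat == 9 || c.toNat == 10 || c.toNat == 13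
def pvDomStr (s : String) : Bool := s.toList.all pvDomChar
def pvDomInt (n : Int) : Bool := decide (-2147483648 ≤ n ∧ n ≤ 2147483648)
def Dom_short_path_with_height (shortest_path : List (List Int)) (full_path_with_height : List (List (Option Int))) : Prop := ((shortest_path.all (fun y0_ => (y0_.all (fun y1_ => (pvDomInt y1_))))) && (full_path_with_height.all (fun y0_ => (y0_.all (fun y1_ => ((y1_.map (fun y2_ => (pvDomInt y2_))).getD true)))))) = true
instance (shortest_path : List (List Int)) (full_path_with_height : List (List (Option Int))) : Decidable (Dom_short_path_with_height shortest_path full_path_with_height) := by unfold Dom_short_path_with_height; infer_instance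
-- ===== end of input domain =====

-- B replaces A's stack-and-flush null-filling machine with a scan for the first non-null
-- height followed by a single forward-fill pass (objective: simpler, same cost).
-- A mutates the freshly built joined rows in place; those lists are never seen by the
-- caller, so the return value is the whole observable behaviour.

-- ===== PORT A =====
-- sp[2] = v on the 3-element rows A builds (exact for rows of length 3)
def pvSet2 (row : List (Option Int)) (v : Option Int) : List (Option Int) :=
  row.take 2 ++ [v]

-- the second for-loop of A, state = (real_path, stack, ref)
def pvALoop : List (List (Option Int)) → List (List (Option Int)) → List (List (Option Int)) → Option Int → List (List (Option Int))
  | [], rp, _, _ => rp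
  | r :: rest, rp, stack, ref =>
    if PySem.List.pyGetD r 2 none = none then
      if ref ≠ none then pvALoop rest (rp ++ [pvSet2 r ref]) stack ref
      else pvALoop rest rp (stack ++ [r]) ref
    else
      let h := PySem.List.pyGetD r 2 none
      if stack = [] then pvALoop rest (rp ++ [r]) stack h
      else pvALoop rest (rp ++ stack.map (fun p => pvSet2 p h) ++ [r]) [] h

def short_path_with_height (shortest_path : List (List Int)) (full_path_with_height : List (List (Option Int))) : List (List (Option Int)) :=
  let joined := shortest_path.foldl (fun acc s =>
    full_path_with_height.foldl (fun acc2 f =>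
      if some (PySem.List.pyGetD s 0 0) = PySem.List.pyGetD f 0 none ∧
         some (PySem.List.pyGetD s 1 0) = PySem.List.pyGetD f 1 none then
        acc2 ++ [[some (PySem.List.pyGetD s 0 0), some (PySem.List.pyGetD s 1 0), PySem.List.pyGetD f 2 none]]
      else acc2) acc) []
  pvALoop joined [] [] none

-- ===== PORT B =====
-- the forward-fill pass of Source B (ref carries the last non-null height)
def pvBFill (ref : Int) : List (Int × Int × Option Int) → List (List (Option Int))
  | [] => []
  | (x, y, h) :: rest =>
    match h with
    | none => [some x, some y, some ref] :: pvBFill ref rest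
    | some v => [some x, some y, some v] :: pvBFill v rest

def short_path_with_height_alt (shortest_path : List (List Int)) (full_path_with_height : List (List (Option Int))) : List (List (Option Int)) :=
  let joined : List (Int × Int × Option Int) := shortest_path.flatMap (fun s =>
    full_path_with_height.filterMap (fun f =>
      if some (PySem.List.pyGetD s 0 0) = PySem.List.pyGetD f 0 none ∧
         some (PySem.List.pyGetD s 1 0) = PySem.List.pyGetD f 1 none then
        some (PySem.List.pyGetD s 0 0, PySem.List.pyGetD s 1 0, PySem.List.pyGetD f 2 none)
      else none))
  match joined.findSome? (fun t => t.2.2) with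
  | none => []
  | some r => pvBFill r joined

-- ===== PRECONDITION & SPEC =====
-- Pre_ admits exactly the inputs on which A's index accesses sp[0], sp[1], fph[0], fph[1], fph[2]
-- all stay in range under Python's lazy left-to-right evaluation, i.e. exactly where A returns.
def Pre_short_path_with_height (shortest_path : List (List Int)) (full_path_with_height : List (List (Option Int))) : Prop :=
  ∀ r ∈ shortest_path, ∀ f ∈ full_path_with_height,
    1 ≤ r.length ∧ 1 ≤ f.length ∧
    (some (PySem.List.pyGetD r 0 0) = PySem.List.pyGetD f 0 none →
      2 ≤ r.length ∧ 2 ≤ f.length ∧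
      (some (PySem.List.pyGetD r 1 0) = PySem.List.pyGetD f 1 none → 3 ≤ f.length))
instance (shortest_path : List (List Int)) (full_path_with_height : List (List (Option Int))) : Decidable (Pre_short_path_with_height shortest_path full_path_with_height) := by unfold Pre_short_path_with_height; infer_instance

def pvWitness_short_path_with_height : List (List Int) × List (List (Option Int)) :=
  ([[1, 2], [3, 4], [1, 2]], [[some 1, some 2, none], [some 3, some 4, some 7]])

def Spec_short_path_with_height (shortest_path : List (List Int)) (full_path_with_height : List (List (Option Int))) (out : List (List (Option Int))) : Prop := out = short_path_with_height_alt shortest_path full_path_with_height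
instance (shortest_path : List (List Int)) (full_path_with_height : List (List (Option Int))) (out : List (List (Option Int))) : Decidable (Spec_short_path_with_height shortest_path full_path_with_height out) := by unfold Spec_short_path_with_height; infer_instance

-- ===== CLAIM (what is proved, stated in full; the proofs are below) =====
def Claim_equal_short_path_with_height : Prop := ∀ (shortest_path : List (List Int)) (full_path_with_height : List (List (Option Int))), Dom_short_path_with_height shortest_path full_path_with_height → Pre_short_path_with_height shortest_path full_path_with_height → Spec_short_path_with_height shortest_path full_path_with_height (short_path_with_height shortest_path full_path_with_height)

-- ===== LEMMAS AND PROOFS =====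
def pvToRow (t : Int × Int × Option Int) : List (Option Int) :=
  [some t.1, some t.2.1, t.2.2]

theorem pvGet2_toRow (t : Int × Int × Option Int) :
    PySem.List.pyGetD (pvToRow t) 2 none = t.2.2 := by
  rcases t with ⟨x, y, h⟩
  simp [pvToRow, PySem.List.pyGetD]

theorem pvSet2_toRow (t : Int × Int × Option Int) (v : Option Int) :
    pvSet2 (pvToRow t) v = pvToRow (t.1, t.2.1, v) := by
  rcases t with ⟨x, y, h⟩; simp [pvToRow, pvSet2]

-- A's loop when no non-null height ever appears: everything stays on the stack
theorem pvALoop_no_val (J : List (Int × Int × Option Int)) :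
    ∀ rp stack, J.findSome? (fun t => t.2.2) = none →
      pvALoop (J.map pvToRow) rp stack none = rp := by
  induction J with
  | nil => intro rp stack _; simp [pvALoop]
  | cons t rest ih =>
    intro rp stack hfs
    rcases t with ⟨x, y, h⟩
    rw [List.findSome?_cons] at hfs
    cases h with
    | some v => simp at hfs
    | none =>
      simp only at hfs
      simp only [List.map_cons, pvALoop, pvGet2_toRow ⟨x, y, none⟩]
      simp only [ne_eq, not_true_eq_false, ite_false]
      exact ih rp (stack ++ [pvToRow (x, y, none)]) hfs

-- A's loop after the first non-null height: empty stack, running reference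
theorem pvALoop_run (J : List (Int × Int × Option Int)) :
    ∀ rp r, pvALoop (J.map pvToRow) rp [] (some r) = rp ++ pvBFill r J := by
  induction J with
  | nil => intro rp r; simp [pvALoop, pvBFill]
  | cons t rest ih =>
    intro rp r
    rcases t with ⟨x, y, h⟩
    cases h with
    | none =>
      simp only [List.map_cons, pvALoop, pvGet2_toRow ⟨x, y, none⟩]
      simp only [ne_eq, reduceCtorEq, not_false_eq_true, if_pos]
      rw [pvSet2_toRow ⟨x, y, none⟩ (some r), ih]
      simp [pvBFill, pvToRow]
    | some v =>
      simp only [List.map_cons, pvALoop, pvGet2_toRow ⟨x, y, some v⟩]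
      simp only [reduceCtorEq, ite_false]
      rw [ih]
      simp [pvBFill, pvToRow]

-- A's loop before the first non-null height h0: stack accumulates, then flushes with h0
theorem pvALoop_wait (J : List (Int × Int × Option Int)) :
    ∀ rp (T : List (Int × Int × Option Int)) h0,
      J.findSome? (fun t => t.2.2) = some h0 →
      pvALoop (J.map pvToRow) rp (T.map pvToRow) none =
        rp ++ T.map (fun t => pvToRow (t.1, t.2.1, some h0)) ++ pvBFill h0 J := by
  induction J with
  | nil => intro rp T h0 hfs; simp at hfs
  | cons t rest ih =>
    intro rp T h0 hfs
    rcases t with ⟨x, y, h⟩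
    rw [List.findSome?_cons] at hfs
    cases h with
    | none =>
      simp only at hfs
      simp only [List.map_cons, pvALoop, pvGet2_toRow ⟨x, y, none⟩]
      simp only [ne_eq, not_true_eq_false, ite_false]
      have : T.map pvToRow ++ [pvToRow (x, y, none)] = (T ++ [(x, y, none)]).map pvToRow := by
        simp
      rw [this, ih rp (T ++ [(x, y, none)]) h0 hfs]
      simp [pvBFill, pvToRow, List.append_assoc]
    | some v =>
      simp only [Option.some.injEq] at hfs
      subst hfs
      simp only [List.map_cons, pvALoop, pvGet2_toRow ⟨x, y, some v⟩]
      simp only [reduceCtorEq, ite_false]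
      cases T with
      | nil =>
        simp only [List.map_nil]
        rw [pvALoop_run]
        simp [pvBFill, pvToRow]
      | cons t0 T' =>
        simp only [List.map_cons]
        rw [if_neg (by simp)]
        rw [pvALoop_run]
        simp only [List.map_map, Function.comp_def, pvSet2_toRow]
        simp [pvBFill, pvToRow, List.append_assoc]

-- the two joins produce the same rows (A's rows = B's triples rendered as rows)
theorem pv_join_eq (shortest_path : List (List Int)) (full_path_with_height : List (List (Option Int))) :
    (shortest_path.foldl (fun acc s =>
      full_path_with_height.foldl (fun acc2 f =>
        if some (PySem.List.pyGetD s 0 0) = PySem.List.pyGetD f 0 none ∧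
           some (PySem.List.pyGetD s 1 0) = PySem.List.pyGetD f 1 none then
          acc2 ++ [[some (PySem.List.pyGetD s 0 0), some (PySem.List.pyGetD s 1 0), PySem.List.pyGetD f 2 none]]
        else acc2) acc) []) =
    (shortest_path.flatMap (fun s =>
      full_path_with_height.filterMap (fun f =>
        if some (PySem.List.pyGetD s 0 0) = PySem.List.pyGetD f 0 none ∧
           some (PySem.List.pyGetD s 1 0) = PySem.List.pyGetD f 1 none then
          some (PySem.List.pyGetD s 0 0, PySem.List.pyGetD s 1 0, PySem.List.pyGetD f 2 none)
        else none))).map pvToRow := by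
  rw [List.map_flatMap]
  have hinner : ∀ (s : List Int) (acc : List (List (Option Int))),
      full_path_with_height.foldl (fun acc2 f =>
        if some (PySem.List.pyGetD s 0 0) = PySem.List.pyGetD f 0 none ∧
           some (PySem.List.pyGetD s 1 0) = PySem.List.pyGetD f 1 none then
          acc2 ++ [[some (PySem.List.pyGetD s 0 0), some (PySem.List.pyGetD s 1 0), PySem.List.pyGetD f 2 none]]
        else acc2) acc =
      acc ++ (full_path_with_height.filterMap (fun f =>
        if some (PySem.List.pyGetD s 0 0) = PySem.List.pyGetD f 0 none ∧
           some (PySem.List.pyGetD s 1 0) = PySem.List.pyGetD f 1 none then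
          some (PySem.List.pyGetD s 0 0, PySem.List.pyGetD s 1 0, PySem.List.pyGetD f 2 none)
        else none)).map pvToRow := by
    intro s acc
    induction full_path_with_height generalizing acc with
    | nil => simp
    | cons f fs ihf =>
      simp only [List.foldl_cons, List.filterMap_cons]
      by_cases hc : some (PySem.List.pyGetD s 0 0) = PySem.List.pyGetD f 0 none ∧
          some (PySem.List.pyGetD s 1 0) = PySem.List.pyGetD f 1 none
      · rw [if_pos hc, if_pos hc, ihf]
        simp [pvToRow]
      · rw [if_neg hc, if_neg hc, ihf]
  simp only [hinner]
  rw [PySem.List.foldl_append_eq_flatMap]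
  simp

-- ===== VERDICT (by name: the statement is the Claim_ definition above) =====
theorem short_path_with_height_spec : Claim_equal_short_path_with_height := by
  intro sp fph _ _
  simp only [Spec_short_path_with_height, short_path_with_height, short_path_with_height_alt]
  rw [pv_join_eq sp fph]
  cases hfs : (sp.flatMap (fun s =>
      fph.filterMap (fun f =>
        if some (PySem.List.pyGetD s 0 0) = PySem.List.pyGetD f 0 none ∧
           some (PySem.List.pyGetD s 1 0) = PySem.List.pyGetD f 1 none then
          some (PySem.List.pyGetD s 0 0, PySem.List.pyGetD s 1 0, PySem.List.pyGetD f 2 none)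
        else none))).findSome? (fun t => t.2.2) with
  | none => simp [pvALoop_no_val _ [] [] hfs]
  | some h0 =>
    have := pvALoop_wait _ [] ([] : List (Int × Int × Option Int)) h0 hfs
    simpa using this
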